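-- pv_equiv track=rewrite | github.com/ArielYssou/Monitoria | Monitoria/modules/menu.py | abbreviate_name
-- ===== SOURCE A (Python) =====
-- def abbreviate_name(name = '', end = True):
--     names = name.title().split()
--     if end:
--         offset = 1
--     else:
--         offset = 0
--     for index in range(1, len(names) - offset):
--         names[index] = names[index][0] + '.'
--     return ' '.join(names)
-- ===== SOURCE B (Python) =====
-- def abbreviate_name(name = '', end = True):
--     names = name.title().split()
--     if not names:
--         return ''
--     out = ''
--     last = True
--     for w in reversed(names[1:]):
--         if last and end:
--             out = ' ' + w + out
--         else:
--             out = ' ' + w[0] + '.' + out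
--         last = False
--     return names[0] + out
-- ===== Notes on version B (the rewrite author's own statement) =====
-- stated objective: alternative
-- what changed: B abandons A's index-range mutation of the word list followed by join: it builds the output string directly back-to-front, folding over the reversed tail of the word list with a string accumulator and a last-word flag (the flag, not index arithmetic, decides whether a word is kept whole), then prepends the first word.
import Mathlib
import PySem

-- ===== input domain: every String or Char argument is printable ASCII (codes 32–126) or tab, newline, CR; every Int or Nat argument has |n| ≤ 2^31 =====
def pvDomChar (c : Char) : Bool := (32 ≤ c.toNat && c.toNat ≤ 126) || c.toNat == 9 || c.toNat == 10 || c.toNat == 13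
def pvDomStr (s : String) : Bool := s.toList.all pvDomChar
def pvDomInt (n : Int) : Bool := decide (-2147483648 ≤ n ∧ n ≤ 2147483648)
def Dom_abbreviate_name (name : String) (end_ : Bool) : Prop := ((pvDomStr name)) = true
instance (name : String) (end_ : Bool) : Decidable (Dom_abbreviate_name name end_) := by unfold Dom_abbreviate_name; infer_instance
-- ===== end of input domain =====

-- B builds the output string back-to-front with an accumulator and a last-word flag over the
-- reversed word tail, instead of A's index-range mutation of the word list plus join (objective: alternative).

-- ===== PORT A =====
-- str.title(), ported by hand (exact on the ASCII domain: a char is capitalised iff the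
-- previous char is not a letter; on printable ASCII Python's "cased" = isalpha).
def pyTitle : List Char → Bool → List Char
  | [], _ => []
  | c :: cs, prev =>
    (if PySem.Chars.isalpha c then
       (if prev then PySem.Chars.lowerChar c else PySem.Chars.upperChar c)
     else c) :: pyTitle cs (PySem.Chars.isalpha c)

-- one iteration of A's for-loop: names[index] = names[index][0] + '.'
-- (the 'none' fallbacks are unreachable: the range index is in bounds and split words are nonempty)
def abbStep (l : List (List Char)) (index : Int) : List (List Char) :=
  match PySem.List.pyGet? l index with
  | some w =>
    match PySem.List.pyGet? w 0 with
    | some c => l.set index.toNat [c, '.']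
    | none => l
  | none => l

def abbreviate_name (name : String) (end_ : Bool) : String :=
  let names := PySem.Chars.split₀ (pyTitle name.toList false)
  let offset : Int := if end_ then 1 else 0
  let names := (PySem.List.pyRange 1 ((names.length : Int) - offset) 1).foldl abbStep names
  String.mk (PySem.Chars.join [' '] names)

-- ===== PORT B =====
-- one iteration of B's loop over reversed(names[1:]): state = (out, last)
-- (the [] case of the match is unreachable: split words are nonempty, like w[0] in the Python)
def altStep (end_ : Bool) (st : List Char × Bool) (w : List Char) : List Char × Bool :=
  if st.2 && end_ then (' ' :: w ++ st.1, false)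
  else ((' ' :: (match w with | c :: _ => [c, '.'] | [] => [])) ++ st.1, false)

def abbreviate_name_alt (name : String) (end_ : Bool) : String :=
  let names := PySem.Chars.split₀ (pyTitle name.toList false)
  match names with
  | [] => String.mk []
  | w0 :: ws =>
    let st := ws.reverse.foldl (altStep end_) ([], true)
    String.mk (w0 ++ st.1)

-- ===== PRECONDITION & SPEC =====
def Spec_abbreviate_name (name : String) (end_ : Bool) (out : String) : Prop := out = abbreviate_name_alt name end_
instance (name : String) (end_ : Bool) (out : String) : Decidable (Spec_abbreviate_name name end_ out) := by unfold Spec_abbreviate_name; infer_instance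

-- ===== CLAIM (what is proved, stated in full; the proofs are below) =====
def Claim_equal_abbreviate_name : Prop := ∀ (name : String) (end_ : Bool), Dom_abbreviate_name name end_ → Spec_abbreviate_name name end_ (abbreviate_name name end_)

-- ===== LEMMAS AND PROOFS =====

-- words produced by split() are never empty
theorem split₀_go_ne_nil (s cur : List Char) (acc : List (List Char))
    (hacc : ∀ w ∈ acc, w ≠ []) :
    ∀ w ∈ PySem.Chars.split₀.go s cur acc, w ≠ [] := by
  induction s generalizing cur acc with
  | nil =>
    intro w hw
    unfold PySem.Chars.split₀.go at hw
    split at hw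
    · exact hacc w (List.mem_reverse.mp hw)
    · next hne =>
      rcases List.mem_cons.mp (List.mem_reverse.mp hw) with rfl | h
      · simp only [List.isEmpty_iff] at hne
        simpa using hne
      · exact hacc w h
  | cons c rest ih =>
    intro w hw
    unfold PySem.Chars.split₀.go at hw
    split at hw
    · split at hw
      · exact ih [] acc hacc w hw
      · next hne =>
        refine ih [] _ ?_ w hw
        intro v hv
        rcases List.mem_cons.mp hv with rfl | h
        · simp only [List.isEmpty_iff] at hne
          simpa using hne
        · exact hacc v h
    · exact ih (c :: cur) acc hacc w hw

theorem split₀_ne_nil (s : List Char) : ∀ w ∈ PySem.Chars.split₀ s, w ≠ [] :=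
  split₀_go_ne_nil s [] [] (by simp)

-- the abbreviation applied to a middle word
def abb (w : List Char) : List Char :=
  match w with
  | c :: _ => [c, '.']
  | [] => []

-- characterisation of A's loop: the fold over range(1, k) maps index i to abb iff 1 ≤ i < k
theorem fold_abbStep (k : Nat) (l : List (List Char)) (hk : k ≤ l.length)
    (hw : ∀ w ∈ l, w ≠ []) :
    (PySem.List.pyRange 1 (k : Int) 1).foldl abbStep l
      = l.mapIdx (fun i w => if 1 ≤ i ∧ i < k then abb w else w) := by
  induction k with
  | zero =>
    have h0 : PySem.List.pyRange 1 ((0 : Nat) : Int) 1 = [] := by decide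
    rw [h0]
    simp only [List.foldl_nil]
    refine (List.ext_getElem (by simp) ?_).symm
    intro i h1 h2
    simp only [List.getElem_mapIdx]
    rw [if_neg (by omega : ¬ (1 ≤ i ∧ i < 0))]
  | succ k ih =>
    by_cases hk1 : k = 0
    · subst hk1
      have h0 : PySem.List.pyRange 1 ((1 : Nat) : Int) 1 = [] := by decide
      rw [h0]
      simp only [List.foldl_nil]
      refine (List.ext_getElem (by simp) ?_).symm
      intro i h1 h2
      simp only [List.getElem_mapIdx]
      rw [if_neg (by omega : ¬ (1 ≤ i ∧ i < 0 + 1))]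
    · have hsplit : PySem.List.pyRange 1 ((k + 1 : Nat) : Int) 1
          = PySem.List.pyRange 1 (k : Int) 1 ++ [(k : Int)] := by
        rw [PySem.List.pyRange_one_append 1 (k : Int) ((k + 1 : Nat) : Int) (by omega) (by push_cast; omega)]
        congr 1
        rw [PySem.List.pyRange_one_cons (by push_cast; omega)]
        have h1 : ((k : Int) + 1) = ((k + 1 : Nat) : Int) := by push_cast; ring
        rw [h1]
        have h0 : PySem.List.pyRange ((k + 1 : Nat) : Int) ((k + 1 : Nat) : Int) 1 = [] := by
          simp
        rw [h0]
      rw [hsplit, List.foldl_append, ih (by omega)]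
      simp only [List.foldl_cons, List.foldl_nil]
      have hkl : k < l.length := by omega
      have hget : PySem.List.pyGet? (l.mapIdx (fun i w => if 1 ≤ i ∧ i < k then abb w else w)) (k : Int)
          = some l[k] := by
        rw [PySem.List.pyGet?_natCast]
        rw [List.getElem?_eq_getElem (by simpa using hkl)]
        simp only [List.getElem_mapIdx]
        simp
      have hwk : l[k] ≠ [] := hw _ (List.getElem_mem hkl)
      obtain ⟨c, cs, hc⟩ : ∃ c cs, l[k] = c :: cs := by
        cases h : l[k] with
        | nil => exact absurd h hwk
        | cons c cs => exact ⟨c, cs, rfl⟩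
      unfold abbStep
      rw [hget, hc]
      simp only [PySem.List.pyGet?, PySem.List.pyIdx?]
      norm_num
      refine List.ext_getElem (by simp) ?_
      intro i h1 h2
      rw [List.getElem_set]
      by_cases hik : k = i
      · rw [if_pos hik]
        subst hik
        simp only [List.getElem_mapIdx]
        rw [if_pos (by omega : 1 ≤ k ∧ k ≤ k)]
        simp [abb, hc]
      · rw [if_neg hik]
        simp only [List.getElem_mapIdx]
        have heq : (1 ≤ i ∧ i < k) ↔ (1 ≤ i ∧ i ≤ k) := by omega
        simp only [heq]

-- characterisation of B's backwards fold: the out-string is the flatMap of ' '-prefixed words,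
-- every word abbreviated except (when end_) the last; the flag is true iff no word was seen
theorem fold_altStep (end_ : Bool) (ws : List (List Char)) (hw : ∀ w ∈ ws, w ≠ []) :
    ws.reverse.foldl (altStep end_) ([], true)
      = ((ws.mapIdx (fun i w =>
            if i < ws.length - (if end_ then 1 else 0) then abb w else w)).flatMap
          (fun w => ' ' :: w), ws.isEmpty) := by
  rw [List.foldl_reverse]
  induction ws with
  | nil => simp
  | cons w rest ih =>
    have hrest : ∀ v ∈ rest, v ≠ [] := fun v hv => hw v (List.mem_cons_of_mem _ hv)
    have hwne : w ≠ [] := hw w List.mem_cons_self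
    obtain ⟨c, cs, rfl⟩ : ∃ c cs, w = c :: cs := by
      cases w with
      | nil => exact absurd rfl hwne
      | cons c cs => exact ⟨c, cs, rfl⟩
    rw [List.foldr_cons, ih hrest]
    cases rest with
    | nil =>
      cases end_ <;> simp [altStep, abb]
    | cons v rest' =>
      obtain ⟨offN, hoffN, hle⟩ : ∃ o : Nat, (if end_ = true then (1:Nat) else 0) = o ∧ o ≤ 1 := by
        cases end_ <;> exact ⟨_, rfl, by norm_num⟩
      simp only [hoffN, altStep, List.isEmpty_cons, Bool.false_and, Bool.false_eq_true,
        if_false, List.mapIdx_cons, List.length_cons]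
      have hL : (fun (i : Nat) w => if i + 1 < rest'.length + 1 - offN then abb w else w)
          = fun (i : Nat) w => if i + 1 + 1 < rest'.length + 1 + 1 - offN then abb w else w := by
        funext i w
        have h : (i + 1 < rest'.length + 1 - offN) ↔ (i + 1 + 1 < rest'.length + 1 + 1 - offN) := by
          omega
        simp only [h]
      have hv : (if 0 < rest'.length + 1 - offN then abb v else v)
          = (if 0 + 1 < rest'.length + 1 + 1 - offN then abb v else v) := by
        have h : (0 < rest'.length + 1 - offN) ↔ (0 + 1 < rest'.length + 1 + 1 - offN) := by omega
        simp only [h]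
      rw [hL, hv]
      simp only [abb, List.flatMap_cons, List.cons_append, List.nil_append]
      rw [if_pos (by omega : 0 < rest'.length + 1 + 1 - offN)]
      rfl

-- join with a single separator, written as a flatMap over the tail
theorem join_cons_flatMap (w0 : List Char) (ws : List (List Char)) :
    PySem.Chars.join [' '] (w0 :: ws) = w0 ++ ws.flatMap (fun w => ' ' :: w) := by
  induction ws generalizing w0 with
  | nil => simp [PySem.Chars.join_singleton]
  | cons v rest ih =>
    rw [PySem.Chars.join_cons_cons, ih v]
    simp

-- B's whole computation after the split, as one function of the word list (proof-side helper)
def altRun (end_ : Bool) : List (List Char) → List Char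
  | [] => []
  | w0 :: ws => w0 ++ (ws.reverse.foldl (altStep end_) ([], true)).1

-- the whole equivalence at the level of the word list
theorem abb_main (end_ : Bool) (l : List (List Char)) (hw : ∀ w ∈ l, w ≠ []) :
    PySem.Chars.join [' '] ((PySem.List.pyRange 1 ((l.length : Int) - (if end_ then (1:Int) else 0)) 1).foldl abbStep l)
      = altRun end_ l := by
  cases l with
  | nil =>
    have hstep : ∀ x : Int, abbStep [] x = [] := by
      intro x
      simp [abbStep, PySem.List.pyGet?, PySem.List.pyIdx?]
    have hfix : ∀ xs : List Int, xs.foldl abbStep [] = [] := by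
      intro xs
      induction xs with
      | nil => rfl
      | cons a t iht => rw [List.foldl_cons, hstep, iht]
    rw [hfix]
    simp [PySem.Chars.join_nil, altRun]
  | cons w0 ws =>
    obtain ⟨offN, hoffI, hoffN, hle⟩ :
        ∃ o : Nat, (if end_ = true then (1:Int) else 0) = (o : Int) ∧
          ((if end_ = true then (1:Nat) else 0) = o) ∧ o ≤ 1 := by
      cases end_ <;> exact ⟨_, by norm_num, rfl, by norm_num⟩
    have hlen : ((w0 :: ws).length : Int) - (if end_ then (1:Int) else 0)
        = (((w0 :: ws).length - offN : Nat) : Int) := by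
      rw [hoffI]
      simp only [List.length_cons]
      omega
    rw [hlen, fold_abbStep _ _ (by omega) hw]
    rw [List.mapIdx_cons, if_neg (by omega : ¬ (1 ≤ 0 ∧ 0 < (w0 :: ws).length - offN))]
    have hshift : (fun (i : Nat) w => if 1 ≤ i + 1 ∧ i + 1 < (w0 :: ws).length - offN then abb w else w)
        = fun (i : Nat) w => if i < ws.length - (if end_ then 1 else 0) then abb w else w := by
      funext i w
      rw [hoffN]
      have h : (1 ≤ i + 1 ∧ i + 1 < (w0 :: ws).length - offN) ↔ (i < ws.length - offN) := by
        simp only [List.length_cons]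
        omega
      simp only [h]
    rw [hshift]
    simp only [altRun]
    rw [fold_altStep end_ ws (fun v hv => hw v (List.mem_cons_of_mem _ hv))]
    exact join_cons_flatMap w0 _

-- ===== VERDICT (by name: the statement is the Claim_ definition above) =====
theorem abbreviate_name_spec : Claim_equal_abbreviate_name := by
  intro name end_ _
  unfold Spec_abbreviate_name abbreviate_name abbreviate_name_alt
  have h := abb_main end_ (PySem.Chars.split₀ (pyTitle name.toList false)) (split₀_ne_nil _)
  cases hc : PySem.Chars.split₀ (pyTitle name.toList false) with
  | nil =>
    rw [hc] at h
    exact congrArg String.mk h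
  | cons w0 ws =>
    rw [hc] at h
    exact congrArg String.mk h
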